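-- pv_equiv track=rewrite | github.com/A-new/bypass360QVM | train/train_company_name_models.py | build_word_markov_chain
-- ===== SOURCE A (Python) =====
-- def build_word_markov_chain(data):
--     chain = {}
--     for words in data:
--         for i in range(len(words)):
--             current = words[i]
--             next_word = words[i + 1] if i + 1 < len(words) else '$'
--             if current not in chain:
--                 chain[current] = {}
--             chain[current][next_word] = chain[current].get(next_word, 0) + 1
--     return chain
-- ===== SOURCE B (Python) =====
-- def build_word_markov_chain(data):
--     counts = {}
--     for words in data:
--         for pair in zip(words, words[1:] + ['$']):
--             counts[pair] = counts.get(pair, 0) + 1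
--     chain = {}
--     for (cur, nxt), c in counts.items():
--         chain.setdefault(cur, {})[nxt] = c
--     return chain
-- ===== Notes on version B (the rewrite author's own statement) =====
-- stated objective: alternative
-- what changed: B first builds a flat counter over all (current, next) transition pairs (zipping each sequence with its shifted self plus the '$' sentinel), then regroups that counter into the nested dict in a separate second pass, instead of A's single pass that mutates nested dicts per index.
import Mathlib
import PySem

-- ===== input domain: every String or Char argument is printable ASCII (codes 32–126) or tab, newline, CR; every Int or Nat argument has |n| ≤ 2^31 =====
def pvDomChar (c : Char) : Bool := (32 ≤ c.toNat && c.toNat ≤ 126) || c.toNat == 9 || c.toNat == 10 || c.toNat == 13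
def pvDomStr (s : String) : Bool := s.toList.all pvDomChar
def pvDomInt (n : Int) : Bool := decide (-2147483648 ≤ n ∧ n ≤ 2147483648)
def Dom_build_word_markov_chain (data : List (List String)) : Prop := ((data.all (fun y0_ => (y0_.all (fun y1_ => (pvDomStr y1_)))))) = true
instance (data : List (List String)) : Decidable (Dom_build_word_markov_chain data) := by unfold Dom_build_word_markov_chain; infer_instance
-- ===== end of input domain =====

-- B replaces A's single-pass nested-dict mutation by a flat transition-pair counter followed by a regrouping pass (alternative decomposition, same cost).

-- ===== PORT A =====
def build_word_markov_chain (data : List (List String)) : List (String × List (String × Int)) :=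
  let chain : PySem.Dict String (PySem.Dict String Int) :=
    data.foldl (fun chain words =>
      (PySem.List.pyRange 0 (words.length : Int) 1).foldl (fun chain i =>
        -- i comes from range(len(words)), so words[i] (and words[i+1] when taken) never raise
        let current := PySem.List.pyGetD words i ""
        let next_word := if i + 1 < (words.length : Int) then PySem.List.pyGetD words (i + 1) "" else "$"
        let chain := if chain.contains current then chain else chain.insert current PySem.Dict.empty
        let inner := chain.getD current PySem.Dict.empty
        chain.insert current (inner.insert next_word (inner.getD next_word 0 + 1))) chain) PySem.Dict.empty
  chain.items.map (fun kv => (kv.1, kv.2.items))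

-- ===== PORT B =====
def build_word_markov_chain_alt (data : List (List String)) : List (String × List (String × Int)) :=
  let counts : PySem.Dict (String × String) Int :=
    data.foldl (fun counts words =>
      (words.zip (words.drop 1 ++ ["$"])).foldl
        (fun counts pair => counts.insert pair (counts.getD pair 0 + 1)) counts) PySem.Dict.empty
  let chain : PySem.Dict String (PySem.Dict String Int) :=
    counts.items.foldl (fun chain item =>
      let chain := chain.setdefault item.1.1 PySem.Dict.empty
      chain.insert item.1.1 ((chain.getD item.1.1 PySem.Dict.empty).insert item.1.2 item.2)) PySem.Dict.empty
  chain.items.map (fun kv => (kv.1, kv.2.items))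

-- ===== PRECONDITION & SPEC =====
def Spec_build_word_markov_chain (data : List (List String)) (out : List (String × List (String × Int))) : Prop := out = build_word_markov_chain_alt data
instance (data : List (List String)) (out : List (String × List (String × Int))) : Decidable (Spec_build_word_markov_chain data out) := by unfold Spec_build_word_markov_chain; infer_instance

-- ===== CLAIM (what is proved, stated in full; the proofs are below) =====
def Claim_equal_build_word_markov_chain : Prop := ∀ (data : List (List String)), Dom_build_word_markov_chain data → Spec_build_word_markov_chain data (build_word_markov_chain data)

-- ===== LEMMAS AND PROOFS =====

def pairsOf (ws : List String) : List (String × String) := ws.zip (ws.drop 1 ++ ["$"])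

theorem pairsOf_snd (ws : List String) (i : Nat) (hi : i < ws.length) (h : i < (ws.drop 1 ++ ["$"]).length) :
    (if (i : Int) + 1 < (ws.length : Int) then PySem.List.pyGetD ws ((i : Int) + 1) "" else "$")
    = (ws.drop 1 ++ ["$"])[i] := by
  by_cases hlt : i + 1 < ws.length
  · rw [if_pos (by exact_mod_cast hlt)]
    rw [PySem.List.pyGetD_eq_getElem ws "" (by omega) (by push_cast; omega)]
    rw [List.getElem_append_left (by simp; omega)]
    simp only [List.getElem_drop]
    have h2 : ((i:Int)+1).toNat = 1 + i := by omega
    simp only [h2]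
  · rw [if_neg (by exact_mod_cast hlt)]
    rw [List.getElem_append_right (by simp; omega)]
    simp

theorem pairsOf_map (ws : List String) :
    (List.range ws.length).map (fun (i : Nat) =>
      (PySem.List.pyGetD ws (i : Int) "",
       if (i : Int) + 1 < (ws.length : Int) then PySem.List.pyGetD ws ((i : Int) + 1) "" else "$"))
    = pairsOf ws := by
  apply List.ext_getElem
  · simp [pairsOf]; omega
  · intro i h1 h2
    have hi : i < ws.length := by simpa using h1
    have hd : i < (ws.drop 1 ++ ["$"]).length := by simp; omega
    simp only [List.getElem_map, List.getElem_range, pairsOf, List.getElem_zip]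
    refine Prod.ext ?_ ?_
    · rw [PySem.List.pyGetD_eq_getElem ws "" (by omega) (by exact_mod_cast hi)]
      simp
    · exact pairsOf_snd ws i hi hd

def stepA (chain : PySem.Dict String (PySem.Dict String Int)) (p : String × String) :
    PySem.Dict String (PySem.Dict String Int) :=
  chain.insert p.1 ((chain.getD p.1 PySem.Dict.empty).insert p.2
    ((chain.getD p.1 PySem.Dict.empty).getD p.2 0 + 1))

theorem stepA_eq (chain : PySem.Dict String (PySem.Dict String Int)) (p : String × String) :
    (let chain1 := if chain.contains p.1 then chain else chain.insert p.1 PySem.Dict.empty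
     let inner := chain1.getD p.1 PySem.Dict.empty
     chain1.insert p.1 (inner.insert p.2 (inner.getD p.2 0 + 1)))
    = stepA chain p := by
  by_cases h : chain.contains p.1
  · simp only [stepA, h, if_true]
  · simp only [stepA, h, if_false, Bool.false_eq_true]
    rw [PySem.Dict.getD_insert_self, PySem.Dict.insert_insert_self,
        PySem.Dict.getD_of_not_contains chain PySem.Dict.empty (by simpa using h)]

theorem A_inner_eq (ws : List String) (chain : PySem.Dict String (PySem.Dict String Int)) :
    (PySem.List.pyRange 0 (ws.length : Int) 1).foldl (fun chain i =>
        let current := PySem.List.pyGetD ws i ""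
        let next_word := if i + 1 < (ws.length : Int) then PySem.List.pyGetD ws (i + 1) "" else "$"
        let chain := if chain.contains current then chain else chain.insert current PySem.Dict.empty
        let inner := chain.getD current PySem.Dict.empty
        chain.insert current (inner.insert next_word (inner.getD next_word 0 + 1))) chain
    = (pairsOf ws).foldl stepA chain := by
  rw [show ((1:Int)) = 1 from rfl]
  rw [PySem.List.pyRange_zero_natCast, List.foldl_map]
  rw [← pairsOf_map ws, List.foldl_map]
  congr 1
  funext ch p
  exact stepA_eq ch (PySem.List.pyGetD ws (p : Int) "", if (p : Int) + 1 < (ws.length : Int) then PySem.List.pyGetD ws ((p : Int) + 1) "" else "$")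

def stepR (chain : PySem.Dict String (PySem.Dict String Int)) (q : (String × String) × Int) :
    PySem.Dict String (PySem.Dict String Int) :=
  chain.insert q.1.1 ((chain.getD q.1.1 PySem.Dict.empty).insert q.1.2 q.2)

theorem stepR_eq (chain : PySem.Dict String (PySem.Dict String Int)) (q : (String × String) × Int) :
    (let chain' := chain.setdefault q.1.1 PySem.Dict.empty
     chain'.insert q.1.1 ((chain'.getD q.1.1 PySem.Dict.empty).insert q.1.2 q.2))
    = stepR chain q := by
  by_cases h : chain.contains q.1.1
  · simp only [stepR, PySem.Dict.setdefault_of_contains chain PySem.Dict.empty h]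
  · have h' : chain.contains q.1.1 = false := by simpa using h
    simp only [stepR, PySem.Dict.setdefault_of_not_contains chain PySem.Dict.empty h']
    rw [PySem.Dict.getD_insert_self, PySem.Dict.insert_insert_self,
        PySem.Dict.getD_of_not_contains chain PySem.Dict.empty h']

-- getD characterization of the A-side fold
theorem foldA_getD (pairs : List (String × String)) :
    ∀ (chain : PySem.Dict String (PySem.Dict String Int)) (c : String),
    (pairs.foldl stepA chain).getD c PySem.Dict.empty
      = ((pairs.filter (fun p => p.1 == c)).map (·.2)).foldl
          (fun d n => d.insert n (d.getD n 0 + 1)) (chain.getD c PySem.Dict.empty) := by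
  induction pairs with
  | nil => intro chain c; rfl
  | cons p ps ih =>
    intro chain c
    simp only [List.foldl_cons, List.filter_cons]
    by_cases h : p.1 = c
    · simp only [h, beq_self_eq_true, if_true, List.map_cons, List.foldl_cons, ih]
      rw [stepA, PySem.Dict.getD_insert, if_pos h.symm]
      rw [h]
    · have hb : (p.1 == c) = false := by simpa using h
      simp only [hb, Bool.false_eq_true, if_false, ih]
      rw [stepA, PySem.Dict.getD_insert, if_neg (Ne.symm h)]

theorem foldR_getD (l : List ((String × String) × Int)) :
    ∀ (chain : PySem.Dict String (PySem.Dict String Int)) (c : String),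
    (l.foldl stepR chain).getD c PySem.Dict.empty
      = ((l.filter (fun q => q.1.1 == c)).map (fun q => (q.1.2, q.2))).foldl
          (fun d kv => d.insert kv.1 kv.2) (chain.getD c PySem.Dict.empty) := by
  induction l with
  | nil => intro chain c; rfl
  | cons q qs ih =>
    intro chain c
    simp only [List.foldl_cons, List.filter_cons]
    by_cases h : q.1.1 = c
    · simp only [h, beq_self_eq_true, if_true, List.map_cons, List.foldl_cons, ih]
      rw [stepR, PySem.Dict.getD_insert, if_pos h.symm, h]
    · have hb : (q.1.1 == c) = false := by simpa using h
      simp only [hb, Bool.false_eq_true, if_false, ih]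
      rw [stepR, PySem.Dict.getD_insert, if_neg (Ne.symm h)]

theorem foldA_keys (pairs : List (String × String)) :
    (pairs.foldl stepA PySem.Dict.empty).keys = PySem.Set.ofList (pairs.map (·.1)) := by
  have h : stepA = fun (d : PySem.Dict String (PySem.Dict String Int)) (p : String × String) =>
      d.insert p.1 ((d.getD p.1 PySem.Dict.empty).insert p.2
        ((d.getD p.1 PySem.Dict.empty).getD p.2 0 + 1)) := rfl
  rw [h, PySem.Dict.keys_foldl_insert_key]
  simp [PySem.Set.update_nil_left]

theorem foldA_nodup (pairs : List (String × String)) :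
    (pairs.foldl stepA PySem.Dict.empty).keys.Nodup := by
  have h : stepA = fun (d : PySem.Dict String (PySem.Dict String Int)) (p : String × String) =>
      d.insert p.1 ((d.getD p.1 PySem.Dict.empty).insert p.2
        ((d.getD p.1 PySem.Dict.empty).getD p.2 0 + 1)) := rfl
  rw [h]
  exact PySem.Dict.nodup_keys_foldl_insert_key _ _ _ _ (by simp)

theorem foldR_keys (l : List ((String × String) × Int)) :
    (l.foldl stepR PySem.Dict.empty).keys = PySem.Set.ofList (l.map (·.1.1)) := by
  have h : stepR = fun (d : PySem.Dict String (PySem.Dict String Int)) (q : (String × String) × Int) =>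
      d.insert q.1.1 ((d.getD q.1.1 PySem.Dict.empty).insert q.1.2 q.2) := rfl
  rw [h, PySem.Dict.keys_foldl_insert_key]
  simp [PySem.Set.update_nil_left]

theorem foldR_nodup (l : List ((String × String) × Int)) :
    (l.foldl stepR PySem.Dict.empty).keys.Nodup := by
  have h : stepR = fun (d : PySem.Dict String (PySem.Dict String Int)) (q : (String × String) × Int) =>
      d.insert q.1.1 ((d.getD q.1.1 PySem.Dict.empty).insert q.1.2 q.2) := rfl
  rw [h]
  exact PySem.Dict.nodup_keys_foldl_insert_key _ _ _ _ (by simp)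

theorem ofList_map_ofList {α β : Type} [BEq α] [LawfulBEq α] [BEq β] [LawfulBEq β]
    (f : α → β) (xs : List α) :
    PySem.Set.ofList ((PySem.Set.ofList xs).map f) = PySem.Set.ofList (xs.map f) := by
  induction xs using List.reverseRecOn with
  | nil => rfl
  | append_singleton xs x ih =>
    rw [PySem.Set.ofList_append_singleton, PySem.Set.add_eq_ite, List.map_append,
        List.map_singleton, PySem.Set.ofList_append_singleton]
    by_cases h : x ∈ PySem.Set.ofList xs
    · rw [if_pos h, ih, PySem.Set.add_eq_ite, if_pos ?_]
      have : x ∈ xs := (PySem.Set.mem_ofList xs x).1 h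
      exact (PySem.Set.mem_ofList _ _).2 (List.mem_map_of_mem this)
    · rw [if_neg h, List.map_append, List.map_singleton,
          PySem.Set.ofList_append_singleton, ih]

theorem ofList_filter_map_snd (pairs : List (String × String)) (c : String) :
    ((PySem.Set.ofList pairs).filter (fun k => k.1 == c)).map (·.2)
      = PySem.Set.ofList ((pairs.filter (fun k => k.1 == c)).map (·.2)) := by
  induction pairs using List.reverseRecOn with
  | nil => rfl
  | append_singleton ps p ih =>
    rw [PySem.Set.ofList_append_singleton, PySem.Set.add_eq_ite, List.filter_append,
        List.map_append]
    by_cases hm : p ∈ PySem.Set.ofList ps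
    · rw [if_pos hm]
      by_cases hc : p.1 = c
      · have hmem : p.2 ∈ (ps.filter (fun k => k.1 == c)).map (·.2) := by
          have hfil : p ∈ ps.filter (fun k => k.1 == c) :=
            List.mem_filter.2 ⟨(PySem.Set.mem_ofList _ _).1 hm, beq_iff_eq.2 hc⟩
          exact List.mem_map_of_mem (f := fun x => x.2) hfil
        rw [ih]
        have : PySem.Set.ofList (((ps.filter (fun k => k.1 == c)).map (·.2))
            ++ ((List.filter (fun k => k.1 == c) [p]).map (·.2))) 
            = PySem.Set.ofList ((ps.filter (fun k => k.1 == c)).map (·.2)) := by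
          simp only [List.filter_cons, List.filter_nil, hc, beq_self_eq_true, if_true,
            List.map_cons, List.map_nil]
          rw [PySem.Set.ofList_append_singleton, PySem.Set.add_eq_ite,
              if_pos ((PySem.Set.mem_ofList _ _).2 hmem)]
        rw [this]
      · simp only [List.filter_cons, List.filter_nil, beq_iff_eq, hc, if_false, List.map_nil,
          List.append_nil]
        exact ih
    · rw [if_neg hm, List.filter_append, List.map_append]
      by_cases hc : p.1 = c
      · simp only [List.filter_cons, List.filter_nil, beq_iff_eq, hc, if_true, List.map_cons,
          List.map_nil]
        rw [ih, PySem.Set.ofList_append_singleton, PySem.Set.add_eq_ite, if_neg ?_]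
        intro hmem
        rcases List.mem_map.1 ((PySem.Set.mem_ofList _ _).1 hmem) with ⟨q, hq, hq2⟩
        rcases List.mem_filter.1 hq with ⟨hqps, hq1⟩
        apply hm
        refine (PySem.Set.mem_ofList _ _).2 ?_
        have : q = p := by
          rcases p with ⟨p1, p2⟩; rcases q with ⟨q1, q2⟩
          simp at hq1 hq2 hc ⊢
          exact ⟨hq1.trans hc.symm, hq2⟩
        rwa [this] at hqps
      · simp only [List.filter_cons, List.filter_nil, beq_iff_eq, hc, if_false, List.map_nil,
          List.append_nil]
        exact ih

theorem count_filter_map_snd (pairs : List (String × String)) (c n : String) :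
    pairs.count (c, n)
      = ((pairs.filter (fun p => p.1 == c)).map (·.2)).count n := by
  induction pairs with
  | nil => rfl
  | cons p ps ih =>
    rcases p with ⟨p1, p2⟩
    by_cases h1 : p1 = c
    · subst h1
      by_cases h2 : p2 = n
      · subst h2
        simp [List.count_cons, List.filter_cons, ih]
      · simp [List.count_cons, List.filter_cons, h2, ih]
    · simp [List.count_cons, List.filter_cons, h1, ih, Prod.ext_iff]

theorem getD_eq (P : List (String × String)) (c : String) :
    (P.foldl stepA PySem.Dict.empty).getD c PySem.Dict.empty
      = ((PySem.Dict.counter P).items.foldl stepR PySem.Dict.empty).getD c PySem.Dict.empty := by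
  rw [foldA_getD, foldR_getD, PySem.Dict.getD_empty]
  rw [PySem.Dict.foldl_insert_getD_add_one_eq_counter]
  -- rewrite the regroup side's item list
  rw [PySem.Dict.items_counter, List.filter_map, List.map_map]
  have hfil : ((fun (q : (String × String) × Int) => q.1.1 == c) ∘
      (fun k => (k, (P.count k : Int)))) = (fun (k : String × String) => k.1 == c) := rfl
  rw [hfil]
  set S := (PySem.Set.ofList P).filter (fun k => k.1 == c) with hS
  have hm : ((fun (q : (String × String) × Int) => (q.1.2, q.2)) ∘
      (fun (k : String × String) => (k, (P.count k : Int))))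
      = fun (k : String × String) => (k.2, (P.count k : Int)) := rfl
  rw [hm]
  -- the inserted keys are exactly the deduped seconds: nodup
  have hkeys : S.map (fun k => k.2) = PySem.Set.ofList ((P.filter (fun p => p.1 == c)).map (·.2)) :=
    ofList_filter_map_snd P c
  have hnd : ((S.map (fun k => (k.2, (P.count k : Int)))).map (·.1)).Nodup := by
    rw [List.map_map]
    have : ((fun (q : String × Int) => q.1) ∘ (fun (k : String × String) => (k.2, (P.count k : Int))))
        = fun (k : String × String) => k.2 := rfl
    rw [this, hkeys]
    exact PySem.Set.nodup_ofList _
  apply PySem.Dict.ext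
  symm
  rw [PySem.Dict.items_foldl_insert_fresh (S.map (fun k => (k.2, (P.count k : Int))))
        (fun q => q.1) (fun q => q.2) PySem.Dict.empty
        (fun a _ => PySem.Dict.contains_empty _) hnd]
  rw [PySem.Dict.items_counter]
  show List.map _ _ = _
  rw [← hkeys, List.map_map, List.map_map]
  apply List.map_congr_left
  intro k hk
  have hk1 : k.1 = c := by
    rcases List.mem_filter.1 hk with ⟨-, h⟩
    exact beq_iff_eq.1 h
  have := count_filter_map_snd P c k.2
  simp only [Function.comp]
  refine Prod.ext rfl ?_
  simp only
  rw [← this, ← hk1]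

theorem keys_eq (P : List (String × String)) :
    (P.foldl stepA PySem.Dict.empty).keys
      = ((PySem.Dict.counter P).items.foldl stepR PySem.Dict.empty).keys := by
  rw [foldA_keys, foldR_keys, PySem.Dict.items_counter, List.map_map]
  have : ((fun (q : (String × String) × Int) => q.1.1) ∘
      (fun (k : String × String) => (k, (P.count k : Int)))) = fun (k : String × String) => k.1 := rfl
  rw [this]
  exact (ofList_map_ofList (fun k => k.1) P).symm

theorem chain_eq (P : List (String × String)) :
    P.foldl stepA PySem.Dict.empty
      = (PySem.Dict.counter P).items.foldl stepR PySem.Dict.empty := by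
  apply PySem.Dict.ext
  rw [PySem.Dict.items_eq_map_keys _ (foldA_nodup P) PySem.Dict.empty,
      PySem.Dict.items_eq_map_keys _ (foldR_nodup _) PySem.Dict.empty,
      ← keys_eq]
  apply List.map_congr_left
  intro k _
  rw [getD_eq]

theorem main_eq (data : List (List String)) :
    build_word_markov_chain data = build_word_markov_chain_alt data := by
  have hA : build_word_markov_chain data
      = ((data.map pairsOf).flatten.foldl stepA PySem.Dict.empty).items.map
          (fun kv => (kv.1, kv.2.items)) := by
    refine congrArg (fun (d : PySem.Dict String (PySem.Dict String Int)) =>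
      d.items.map (fun kv => (kv.1, kv.2.items))) ?_
    rw [List.foldl_flatten, List.foldl_map]
    congr 1
    funext ch ws
    exact A_inner_eq ws ch
  have hCounts : data.foldl (fun counts words =>
      (words.zip (words.drop 1 ++ ["$"])).foldl
        (fun (counts : PySem.Dict (String × String) Int) pair =>
          counts.insert pair (counts.getD pair 0 + 1)) counts) PySem.Dict.empty
      = PySem.Dict.counter ((data.map pairsOf).flatten) := by
    rw [← PySem.Dict.foldl_insert_getD_add_one_eq_counter, List.foldl_flatten, List.foldl_map]
    rfl
  have hB : build_word_markov_chain_alt data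
      = ((PySem.Dict.counter ((data.map pairsOf).flatten)).items.foldl stepR
          PySem.Dict.empty).items.map (fun kv => (kv.1, kv.2.items)) := by
    refine congrArg (fun (d : PySem.Dict String (PySem.Dict String Int)) =>
      d.items.map (fun kv => (kv.1, kv.2.items))) ?_
    rw [hCounts]
    congr 1
    funext ch q
    exact stepR_eq ch q
  rw [hA, hB, chain_eq]

-- ===== VERDICT (by name: the statement is the Claim_ definition above) =====
theorem build_word_markov_chain_spec : Claim_equal_build_word_markov_chain := by
  intro data _
  show build_word_markov_chain data = build_word_markov_chain_alt data
  exact main_eq data
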